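-- pv_equiv track=rewrite | github.com/TPIOS/LeetCode-cn-solutions | First Hundred/0036.py | check
-- ===== SOURCE A (Python) =====
-- def check(nums):
--     tmp = {}
--     for num in nums:
--         if num.isdigit():
--             if num in tmp:
--                 return False
--             else:
--                 tmp[num] = 1
--     return True
-- ===== SOURCE B (Python) =====
-- def check(nums):
--     digits = sorted(n for n in nums if n.isdigit())
--     return all(a != b for a, b in zip(digits, digits[1:]))
-- ===== Notes on version B (the rewrite author's own statement) =====
-- stated objective: alternative
-- what changed: Replaces the hash-based single pass (dict membership with early return) by sort-then-scan: sort the filtered digit strings and report whether any two adjacent entries are equal.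
import Mathlib
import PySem

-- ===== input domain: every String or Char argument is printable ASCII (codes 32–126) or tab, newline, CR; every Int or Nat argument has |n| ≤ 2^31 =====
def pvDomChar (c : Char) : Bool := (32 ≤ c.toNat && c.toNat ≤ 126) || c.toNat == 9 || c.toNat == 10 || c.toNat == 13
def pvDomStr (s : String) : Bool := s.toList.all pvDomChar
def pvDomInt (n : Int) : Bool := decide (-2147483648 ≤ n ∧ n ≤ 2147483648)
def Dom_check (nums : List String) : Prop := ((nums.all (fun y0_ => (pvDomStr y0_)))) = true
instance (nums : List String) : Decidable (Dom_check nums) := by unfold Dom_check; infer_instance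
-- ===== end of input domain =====

-- B replaces A's dict-membership single pass by sort-then-adjacent-scan over the filtered digit strings (alternative algorithm; return value only).

-- ===== PORT A =====
def checkGo (tmp : PySem.Dict String Int) : List String → Bool
  | [] => true
  | num :: rest =>
    if PySem.Str.strIsdigit num then
      if tmp.contains num then false
      else checkGo (tmp.insert num 1) rest
    else checkGo tmp rest

def check (nums : List String) : Bool := checkGo PySem.Dict.empty nums

-- ===== PORT B =====
-- all(a != b for a, b in zip(digits, digits[1:]))
def adjAllNe : List String → Bool
  | [] => true
  | [_] => true
  | a :: b :: rest => a != b && adjAllNe (b :: rest)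

def check_alt (nums : List String) : Bool :=
  let digits := PySem.List.sorted (nums.filter PySem.Str.strIsdigit) (fun x => x) false
  adjAllNe digits

-- ===== PRECONDITION & SPEC =====
def Spec_check (nums : List String) (out : Bool) : Prop := out = check_alt nums
instance (nums : List String) (out : Bool) : Decidable (Spec_check nums out) := by unfold Spec_check; infer_instance

-- ===== CLAIM (what is proved, stated in full; the proofs are below) =====
def Claim_equal_check : Prop := ∀ (nums : List String), Dom_check nums → Spec_check nums (check nums)

-- ===== LEMMAS AND PROOFS =====

-- the loop of A decides: the digit strings seen so far are pairwise distinct and not yet in tmp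
lemma checkGo_iff (nums : List String) : ∀ tmp : PySem.Dict String Int,
    (checkGo tmp nums = true ↔
      (nums.filter PySem.Str.strIsdigit).Nodup ∧
        ∀ x ∈ nums.filter PySem.Str.strIsdigit, tmp.contains x = false) := by
  induction nums with
  | nil => intro tmp; simp [checkGo]
  | cons num rest ih =>
    intro tmp
    rw [checkGo]
    by_cases hd : PySem.Str.strIsdigit num
    · rw [if_pos hd, List.filter_cons_of_pos hd]
      by_cases hc : tmp.contains num
      · rw [if_pos hc]
        constructor
        · intro h; cases h
        · rintro ⟨_, hall⟩
          have := hall num (List.mem_cons_self)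
          rw [hc] at this; cases this
      · rw [if_neg hc, ih]
        constructor
        · rintro ⟨hn, hall⟩
          have hnm : num ∉ List.filter PySem.Str.strIsdigit rest := by
            intro hmem
            have h2 := hall num hmem
            rw [PySem.Dict.contains_insert] at h2
            simp at h2
          refine ⟨List.Nodup.cons hnm hn, ?_⟩
          intro x hx
          rcases List.mem_cons.mp hx with rfl | hx'
          · exact Bool.eq_false_iff.mpr hc
          · have h2 := hall x hx'
            rw [PySem.Dict.contains_insert] at h2
            exact (Bool.or_eq_false_iff.mp h2).2
        · rintro ⟨hn, hall⟩
          have hn' := List.nodup_cons.mp hn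
          refine ⟨hn'.2, ?_⟩
          intro x hx
          rw [PySem.Dict.contains_insert, Bool.or_eq_false_iff]
          refine ⟨beq_eq_false_iff_ne.mpr ?_, hall x (List.mem_cons_of_mem _ hx)⟩
          intro he
          exact hn'.1 (he ▸ hx)
    · rw [if_neg hd, List.filter_cons_of_neg hd]
      exact ih tmp

lemma adjAllNe_iff : ∀ xs : List String, adjAllNe xs = true ↔ xs.IsChain (· ≠ ·)
  | [] => by simp [adjAllNe]
  | [a] => by simp [adjAllNe]
  | a :: b :: rest => by
    rw [adjAllNe, Bool.and_eq_true, adjAllNe_iff (b :: rest), List.isChain_cons_cons]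
    simp [bne_iff_ne]

lemma pairwise_lt_of_isChain_ne : ∀ xs : List String, xs.Pairwise (· ≤ ·) →
    xs.IsChain (· ≠ ·) → xs.Pairwise (· < ·)
  | [] => by simp
  | [a] => by simp
  | a :: b :: t => by
    intro hp hc
    obtain ⟨hab, hc'⟩ := List.isChain_cons_cons.mp hc
    obtain ⟨hle, hp'⟩ := List.pairwise_cons.mp hp
    have ih := pairwise_lt_of_isChain_ne (b :: t) hp' hc'
    refine List.pairwise_cons.mpr ⟨?_, ih⟩
    intro x hx
    rcases List.mem_cons.mp hx with rfl | hx'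
    · exact lt_of_le_of_ne (hle x hx) hab
    · exact lt_of_lt_of_le (lt_of_le_of_ne (hle b List.mem_cons_self) hab)
        ((List.pairwise_cons.mp hp').1 x hx')

lemma isChain_ne_of_pairwise_ne : ∀ xs : List String, xs.Pairwise (· ≠ ·) →
    xs.IsChain (· ≠ ·)
  | [] => by simp
  | [a] => by simp
  | a :: b :: t => by
    intro hp
    obtain ⟨hne, hp'⟩ := List.pairwise_cons.mp hp
    exact List.isChain_cons_cons.mpr ⟨hne b List.mem_cons_self,
      isChain_ne_of_pairwise_ne (b :: t) hp'⟩

-- on a ≤-sorted list, "no equal adjacent elements" is exactly Nodup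
lemma isChain_ne_iff_nodup (xs : List String) (hs : xs.Pairwise (· ≤ ·)) :
    xs.IsChain (· ≠ ·) ↔ xs.Nodup := by
  constructor
  · intro hc
    exact (pairwise_lt_of_isChain_ne xs hs hc).imp fun h => ne_of_lt h
  · intro hn
    exact isChain_ne_of_pairwise_ne xs hn

-- ===== VERDICT (by name: the statement is the Claim_ definition above) =====
theorem check_spec : Claim_equal_check := by
  intro nums _
  unfold Spec_check check check_alt
  rw [Bool.eq_iff_iff, checkGo_iff, adjAllNe_iff]
  simp only [PySem.Dict.contains_empty, implies_true, and_true]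
  rw [isChain_ne_iff_nodup _ (by simpa using PySem.List.sorted_pairwise (nums.filter PySem.Str.strIsdigit) (fun x => x) )]
  exact ((PySem.List.sorted_perm (nums.filter PySem.Str.strIsdigit) (fun x => x) false).nodup_iff).symm
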